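-- pv_equiv track=rewrite | github.com/Mvk122/Leetcode-Solutions | bending.py | is_turbulent
-- ===== SOURCE A (Python) =====
-- def is_turbulent(s):
--     turb = True
--     receding = True
--
--     for i, e in enumerate(s):
--         if i == 0:
--             continue
--         elif ord(e) < ord(s[i-1]):
--             turb = False
--         elif ord(e) > ord(s[i-1]):
--             receding = False
--
--     return (not turb) and (not receding)
-- ===== SOURCE B (Python) =====
-- def is_turbulent(s):
--     cs = list(s)
--     return cs != sorted(cs) and cs != sorted(cs, reverse=True)
-- ===== Notes on version B (the rewrite author's own statement) =====
-- stated objective: alternative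
-- what changed: A's stateful flag-clearing scan over adjacent pairs is replaced by a monotonicity test via sorted copies: the string is turbulent exactly when it equals neither its ascending nor its descending stable sort.
import Mathlib
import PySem

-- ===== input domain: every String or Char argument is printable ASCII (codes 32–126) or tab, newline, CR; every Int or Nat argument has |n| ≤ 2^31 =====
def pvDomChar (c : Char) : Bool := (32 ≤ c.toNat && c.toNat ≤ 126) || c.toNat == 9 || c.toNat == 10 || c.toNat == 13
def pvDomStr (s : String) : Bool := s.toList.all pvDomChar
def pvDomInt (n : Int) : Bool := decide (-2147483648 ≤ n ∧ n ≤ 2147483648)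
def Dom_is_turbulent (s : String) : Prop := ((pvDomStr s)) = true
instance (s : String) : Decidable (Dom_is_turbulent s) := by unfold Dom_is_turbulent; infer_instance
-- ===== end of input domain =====

-- B replaces A's stateful flag-clearing scan with a monotonicity test via sorted copies
-- (objective: alternative); return values are identical on every input.

-- ===== PORT A =====
-- A: one pass over enumerate(s), flags turb/receding cleared on a decrease/increase;
-- s[i-1] is always in range (only read when i ≥ 1), ported as pyGetD with a dummy default.
def is_turbulent (s : String) : Bool :=
  let cs := s.toList
  let st := (PySem.List.enumerate cs 0).foldl
    (fun (st : Bool × Bool) (p : Int × Char) =>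
      if p.1 == 0 then st
      else if p.2 < PySem.List.pyGetD cs (p.1 - 1) ' ' then (false, st.2)
      else if PySem.List.pyGetD cs (p.1 - 1) ' ' < p.2 then (st.1, false)
      else st)
    (true, true)
  !st.1 && !st.2

-- ===== PORT B =====
-- B: the string is turbulent iff it equals neither its ascending nor its descending
-- stable sort (list(s) != sorted(cs) and cs != sorted(cs, reverse=True)).
def is_turbulent_alt (s : String) : Bool :=
  let cs := s.toList
  (cs != PySem.List.sorted cs (fun x => x) false) &&
  (cs != PySem.List.sorted cs (fun x => x) true)

-- ===== PRECONDITION & SPEC =====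
def Spec_is_turbulent (s : String) (out : Bool) : Prop := out = is_turbulent_alt s
instance (s : String) (out : Bool) : Decidable (Spec_is_turbulent s out) := by unfold Spec_is_turbulent; infer_instance

-- ===== CLAIM (what is proved, stated in full; the proofs are below) =====
def Claim_equal_is_turbulent : Prop := ∀ (s : String), Dom_is_turbulent s → Spec_is_turbulent s (is_turbulent s)

-- ===== LEMMAS AND PROOFS =====

-- the body of A's loop, as a function of the previous and current character
def pvStep (st : Bool × Bool) (q : Char × Char) : Bool × Bool :=
  if q.2 < q.1 then (false, st.2)
  else if q.1 < q.2 then (st.1, false)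
  else st

-- A's fold over the enumerate suffix starting at k ≥ 1 equals a fold of pvStep over the
-- adjacent pairs of the suffix cs.drop (k-1)
theorem pv_loop_eq (rest : List Char) : ∀ (cs : List Char) (k : Nat) (st : Bool × Bool),
    cs.drop k = rest → 1 ≤ k →
    (PySem.List.enumerate rest (k : Int)).foldl
      (fun (st : Bool × Bool) (p : Int × Char) =>
        if p.1 == 0 then st
        else if p.2 < PySem.List.pyGetD cs (p.1 - 1) ' ' then (false, st.2)
        else if PySem.List.pyGetD cs (p.1 - 1) ' ' < p.2 then (st.1, false)
        else st) st
    = ((cs.drop (k-1)).zip rest).foldl pvStep st := by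
  induction rest with
  | nil => intro cs k st hdrop hk; simp [PySem.List.enumerate]
  | cons e rest ih =>
    intro cs k st hdrop hk
    have hklen : k < cs.length := by
      by_contra h
      simp [List.drop_eq_nil_of_le (Nat.le_of_not_lt h)] at hdrop
    have hk1 : k - 1 < cs.length := by omega
    have hdropk1 := List.drop_eq_getElem_cons hk1
    rw [show k - 1 + 1 = k from by omega] at hdropk1
    have hprev : PySem.List.pyGetD cs ((k : Int) - 1) ' ' = cs[k-1] := by
      have hcast : (k : Int) - 1 = ((k - 1 : Nat) : Int) := by omega
      rw [hcast, PySem.List.pyGetD_natCast, List.getD_eq_getElem?_getD,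
          List.getElem?_eq_getElem hk1]
      rfl
    have hkne : ((k : Int) == 0) = false := by
      rw [beq_eq_false_iff_ne]
      omega
    rw [PySem.List.enumerate_cons, List.foldl_cons, hdropk1, hdrop, List.zip_cons_cons,
        List.foldl_cons]
    simp only [hkne, Bool.false_eq_true, if_false, hprev]
    have := ih cs (k+1) (pvStep st (cs[k-1], e)) (by simpa [List.drop_drop] using congrArg (List.drop 1) hdrop) (by omega)
    simp only [Nat.add_sub_cancel] at this
    push_cast at this
    rw [hdrop] at this
    exact this

-- the pvStep fold computes (¬ has_dec, ¬ has_inc) relative to the initial flags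
theorem pv_fold_step (l : List (Char × Char)) : ∀ (st : Bool × Bool),
    l.foldl pvStep st = (st.1 && !(l.any (fun p => p.2 < p.1)), st.2 && !(l.any (fun p => p.1 < p.2))) := by
  induction l with
  | nil => intro st; simp
  | cons q l ih =>
    intro st
    rw [List.foldl_cons, ih]
    rcases lt_trichotomy q.2 q.1 with h | h | h
    · simp [pvStep, h, lt_asymm h]
    · simp [pvStep, h]
    · simp [pvStep, h, lt_asymm h]

-- no adjacent decrease ↔ the chain of ≤ holds
theorem pv_any_dec_iff (cs : List Char) :
    ((cs.zip (cs.drop 1)).any (fun p => p.2 < p.1) = false) ↔ List.IsChain (· ≤ ·) cs := by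
  induction cs with
  | nil => simp
  | cons a t ih =>
    cases t with
    | nil => simp
    | cons b t =>
      simp only [List.drop_succ_cons, List.drop_zero, List.zip_cons_cons, List.any_cons,
        Bool.or_eq_false_iff, List.isChain_cons_cons] at *
      constructor
      · rintro ⟨h1, h2⟩; exact ⟨not_lt.mp (by simpa using h1), ih.mp h2⟩
      · rintro ⟨h1, h2⟩; exact ⟨by simpa using not_lt.mpr h1, ih.mpr h2⟩

-- no adjacent increase ↔ the chain of ≥ holds
theorem pv_any_inc_iff (cs : List Char) :
    ((cs.zip (cs.drop 1)).any (fun p => p.1 < p.2) = false) ↔ List.IsChain (fun a b => b ≤ a) cs := by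
  induction cs with
  | nil => simp
  | cons a t ih =>
    cases t with
    | nil => simp
    | cons b t =>
      simp only [List.drop_succ_cons, List.drop_zero, List.zip_cons_cons, List.any_cons,
        Bool.or_eq_false_iff, List.isChain_cons_cons] at *
      constructor
      · rintro ⟨h1, h2⟩; exact ⟨not_lt.mp (by simpa using h1), ih.mp h2⟩
      · rintro ⟨h1, h2⟩; exact ⟨by simpa using not_lt.mpr h1, ih.mpr h2⟩

-- cs equals its ascending stable sort iff cs is non-decreasing
theorem pv_sorted_asc_iff (cs : List Char) :
    PySem.List.sorted cs (fun x => x) false = cs ↔ List.IsChain (· ≤ ·) cs := by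
  rw [List.isChain_iff_pairwise]
  constructor
  · intro h
    have := PySem.List.sorted_pairwise cs (fun x => x)
    rwa [h] at this
  · intro h
    exact PySem.List.sorted_eq_self_of_pairwise cs (fun x => x) h

-- cs equals its descending stable sort iff cs is non-increasing
theorem pv_sorted_desc_iff (cs : List Char) :
    PySem.List.sorted cs (fun x => x) true = cs ↔ List.IsChain (fun a b => b ≤ a) cs := by
  rw [List.isChain_iff_pairwise]
  constructor
  · intro h
    have := PySem.List.sorted_pairwise_rev cs (fun x => x)
    rwa [h] at this
  · intro h
    exact PySem.List.sorted_rev_eq_self_of_pairwise cs (fun x => x) h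

-- ===== VERDICT (by name: the statement is the Claim_ definition above) =====
theorem is_turbulent_spec : Claim_equal_is_turbulent := by
  intro s _
  show is_turbulent s = is_turbulent_alt s
  set cs := s.toList with hcs
  -- left side: A's fold evaluated via pv_loop_eq / pv_fold_step
  have hA : is_turbulent s
      = ((cs.zip (cs.drop 1)).any (fun p => p.2 < p.1) &&
         (cs.zip (cs.drop 1)).any (fun p => p.1 < p.2)) := by
    unfold is_turbulent
    rw [← hcs]
    cases hc : cs with
    | nil => simp [PySem.List.enumerate]
    | cons c rest =>
      simp only
      rw [PySem.List.enumerate_cons, List.foldl_cons]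
      have h0 : ((0 : Int) == 0) = true := by decide
      simp only [h0, if_true]
      rw [show (0 : Int) + 1 = ((1 : Nat) : Int) by norm_num]
      rw [pv_loop_eq rest (c :: rest) 1 (true, true) rfl (le_refl 1)]
      rw [pv_fold_step]
      simp
  rw [hA]
  unfold is_turbulent_alt
  rw [← hcs]
  simp only
  -- right side: the two ≠-tests, characterised by the sorted lemmas
  have hd : ((cs != PySem.List.sorted cs (fun x => x) false) : Bool)
      = (cs.zip (cs.drop 1)).any (fun p => p.2 < p.1) := by
    rcases h : (cs.zip (cs.drop 1)).any (fun p => p.2 < p.1) with _ | _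
    · have := (pv_sorted_asc_iff cs).mpr ((pv_any_dec_iff cs).mp h)
      simp [bne, this]
    · have hne : PySem.List.sorted cs (fun x => x) false ≠ cs := by
        intro he
        have h2 := (pv_any_dec_iff cs).mpr ((pv_sorted_asc_iff cs).mp he)
        rw [h] at h2
        exact Bool.noConfusion h2
      simp [bne, Ne.symm hne]
  have hi : ((cs != PySem.List.sorted cs (fun x => x) true) : Bool)
      = (cs.zip (cs.drop 1)).any (fun p => p.1 < p.2) := by
    rcases h : (cs.zip (cs.drop 1)).any (fun p => p.1 < p.2) with _ | _
    · have := (pv_sorted_desc_iff cs).mpr ((pv_any_inc_iff cs).mp h)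
      simp [bne, this]
    · have hne : PySem.List.sorted cs (fun x => x) true ≠ cs := by
        intro he
        have h2 := (pv_any_inc_iff cs).mpr ((pv_sorted_desc_iff cs).mp he)
        rw [h] at h2
        exact Bool.noConfusion h2
      simp [bne, Ne.symm hne]
  rw [hd, hi]
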